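-- pv_equiv track=rewrite | github.com/faizanpo/EmpowerWMS | woocommerce_custom/models/main_view.py | sorted_params
-- ===== SOURCE A (Python) =====
-- from collections import OrderedDict
--
-- def sorted_params(params):
--     ordered = OrderedDict()
--     base_keys = sorted(set(k.split('[')[0] for k in params.keys()))
--
--     for base in base_keys:
--         for key in params.keys():
--             if key == base or key.startswith(base + '['):
--                 ordered[key] = params[key]
--
--     return ordered
-- ===== SOURCE B (Python) =====
-- from collections import OrderedDict
--
-- def sorted_params(params):
--     # One pass: bucket items by base key (text before the first '['),
--     # then emit buckets in sorted base order.
--     buckets = {}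
--     for key, value in params.items():
--         buckets.setdefault(key.split('[')[0], []).append((key, value))
--     ordered = OrderedDict()
--     for base in sorted(buckets):
--         for key, value in buckets[base]:
--             ordered[key] = value
--     return ordered
-- ===== Notes on version B (the rewrite author's own statement) =====
-- stated objective: faster
-- what changed: Instead of rescanning all keys once per base key (nested loops), B buckets the items by their base key in a single pass over the dict and then concatenates the buckets in sorted base order.
import Mathlib
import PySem

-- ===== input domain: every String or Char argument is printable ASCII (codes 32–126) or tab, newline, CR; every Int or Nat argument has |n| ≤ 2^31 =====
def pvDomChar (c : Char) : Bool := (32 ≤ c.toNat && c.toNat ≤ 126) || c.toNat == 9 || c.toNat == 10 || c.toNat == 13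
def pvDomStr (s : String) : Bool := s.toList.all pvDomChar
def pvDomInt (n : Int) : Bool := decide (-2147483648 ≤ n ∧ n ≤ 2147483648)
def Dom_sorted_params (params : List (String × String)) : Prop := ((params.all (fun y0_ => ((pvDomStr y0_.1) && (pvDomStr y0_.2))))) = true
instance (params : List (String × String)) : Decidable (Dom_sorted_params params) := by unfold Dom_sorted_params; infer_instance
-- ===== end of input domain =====

-- B buckets the items by base key in one pass and emits buckets in sorted base order,
-- replacing A's rescan of all keys for every base (faster in a timing run).


-- ===== PORT A =====
-- k.split('[')[0]  ('[' is a nonempty separator, so split? is some; the result list is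
-- never empty, so [0] never raises and headD's defaults are unreachable)
def pyBase (k : String) : String := ((PySem.Str.split? k "[").getD []).headD ""

def sorted_params (params : List (String × String)) : List (String × String) :=
  let base_keys :=
    PySem.List.sorted (PySem.Set.ofList (params.map (fun kv => pyBase kv.1))) (fun x => x) false
  let ordered : PySem.Dict String String :=
    base_keys.foldl (fun od base =>
      params.foldl (fun od kv =>
        if kv.1 == base || PySem.Str.startswith kv.1 (base ++ "[") then
          od.insert kv.1 ((PySem.Dict.mk params).getD kv.1 "")
        else od) od) PySem.Dict.empty
  ordered.items

-- ===== PORT B =====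
def sorted_params_alt (params : List (String × String)) : List (String × String) :=
  let buckets : PySem.Dict String (List (String × String)) :=
    params.foldl (fun d kv => d.modify (pyBase kv.1) [] (fun l => l ++ [kv])) PySem.Dict.empty
  let bases := PySem.List.sorted buckets.keys (fun x => x) false
  bases.foldl (fun out b => out ++ buckets.getD b []) []

-- ===== PRECONDITION & SPEC =====
-- Pre_ excludes association lists with duplicate keys: a Python dict cannot contain
-- duplicate keys, so such lists represent no input of A.
def Pre_sorted_params (params : List (String × String)) : Prop :=
  (params.map (fun kv => kv.1)).Nodup

instance (params : List (String × String)) : Decidable (Pre_sorted_params params) := by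
  unfold Pre_sorted_params; infer_instance

def pvWitness_sorted_params : (List (String × String)) :=
  [("a[0]", "1"), ("b", "2"), ("a", "3")]

def Spec_sorted_params (params : List (String × String)) (out : List (String × String)) : Prop := out = sorted_params_alt params
instance (params : List (String × String)) (out : List (String × String)) : Decidable (Spec_sorted_params params out) := by unfold Spec_sorted_params; infer_instance

-- ===== CLAIM (what is proved, stated in full; the proofs are below) =====
def Claim_equal_sorted_params : Prop := ∀ (params : List (String × String)), Dom_sorted_params params → Pre_sorted_params params → Spec_sorted_params params (sorted_params params)

-- ===== LEMMAS AND PROOFS =====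

-- head of splitOn.go on a single-char separator: the chars before the first occurrence
theorem splitOn_go_head (c : Char) :
    ∀ (fuel : Nat) (l cur : List Char) (acc : List (List Char)), l.length < fuel →
      ∃ ts, PySem.Chars.splitOn.go [c] fuel l cur acc
            = acc.reverse ++ (cur.reverse ++ l.takeWhile (fun x => x != c)) :: ts := by
  intro fuel
  induction fuel with
  | zero => intro l cur acc h; omega
  | succ n ih =>
    intro l cur acc h
    cases l with
    | nil =>
      exact ⟨[], by simp [PySem.Chars.splitOn.go]⟩
    | cons c' rest =>
      by_cases hc : c' = c
      · subst hc
        obtain ⟨ts, hts⟩ := ih rest [] (cur.reverse :: acc) (by simpa using Nat.lt_of_succ_lt_succ h)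
        refine ⟨rest.takeWhile (fun x => x != c') :: ts, ?_⟩
        simp only [PySem.Chars.splitOn.go, List.isPrefixOf, and_true, beq_self_eq_true]
        rw [if_pos (by rfl)]
        simp only [List.takeWhile_cons, bne_self_eq_false, if_neg, Bool.false_eq_true,
          not_false_eq_true]
        rw [show List.drop [c'].length (c' :: rest) = rest from rfl, hts]
        simp
      · obtain ⟨ts, hts⟩ := ih rest (c' :: cur) acc (by simpa using Nat.lt_of_succ_lt_succ h)
        refine ⟨ts, ?_⟩
        simp only [PySem.Chars.splitOn.go]
        rw [if_neg (by simp only [List.isPrefixOf, Bool.and_eq_true, beq_iff_eq,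
          List.isPrefixOf_nil_left, and_true]; exact fun hh => hc hh.symm)]
        rw [hts]
        have hc' : (c' != c) = true := by simp [hc]
        simp only [List.takeWhile_cons, hc', if_true]
        simp only [List.reverse_cons, List.append_assoc, List.singleton_append]

theorem toList_pyBase (k : String) :
    (pyBase k).toList = k.toList.takeWhile (fun x => x != '[') := by
  have hmap := PySem.Str.split?_map k "["
  have hsep : ("[" : String).toList = ['['] := rfl
  rw [hsep] at hmap
  unfold PySem.Chars.split? at hmap
  rw [if_neg (by simp)] at hmap
  obtain ⟨ts, hts⟩ :=
    splitOn_go_head '[' (k.toList.length + 1) k.toList [] [] (Nat.lt_succ_self _)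
  unfold PySem.Chars.splitOn at hmap
  rw [hts] at hmap
  simp only [List.reverse_nil, List.nil_append] at hmap
  cases hsp : PySem.Str.split? k "[" with
  | none => rw [hsp] at hmap; simp at hmap
  | some ss =>
    rw [hsp] at hmap
    simp only [Option.map_some, Option.some.injEq] at hmap
    cases ss with
    | nil => simp at hmap
    | cons s0 ss' =>
      simp only [List.map_cons, List.cons.injEq] at hmap
      simp [pyBase, hsp, hmap.1]

theorem pyBase_no_bracket (k : String) : '[' ∉ (pyBase k).toList := by
  rw [toList_pyBase]
  intro hmem
  have := List.mem_takeWhile_imp hmem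
  simp at this

theorem pyBase_of_no_bracket (b : String) (hb : '[' ∉ b.toList) : pyBase b = b := by
  rw [← String.toList_inj, toList_pyBase]
  apply List.takeWhile_eq_self_iff.mpr
  intro x hx
  have : x ≠ '[' := fun h => hb (h ▸ hx)
  simpa using this

theorem takeWhile_bracket_append (bs r : List Char) (hb : '[' ∉ bs) :
    (bs ++ '[' :: r).takeWhile (fun x => x != '[') = bs := by
  induction bs with
  | nil => simp [List.takeWhile_cons]
  | cons x xs ih =>
    simp only [List.mem_cons, not_or] at hb
    have hx : (x != '[') = true := by
      simp only [bne_iff_ne, ne_eq]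
      exact fun h => hb.1 h.symm
    simp only [List.cons_append, List.takeWhile_cons, hx, if_pos]
    rw [ih hb.2]

-- the membership test in A's inner loop is exactly "pyBase key == base" for bracket-free bases
theorem cond_eq (k b : String) (hb : '[' ∉ b.toList) :
    (k == b || PySem.Str.startswith k (b ++ "[")) = (pyBase k == b) := by
  rw [Bool.eq_iff_iff]
  simp only [Bool.or_eq_true, beq_iff_eq, PySem.Str.startswith_eq, PySem.Chars.startswith_iff]
  constructor
  · rintro (rfl | hpre)
    · exact pyBase_of_no_bracket k hb
    · obtain ⟨r, hr⟩ := hpre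
      rw [← String.toList_inj, toList_pyBase, ← hr]
      rw [String.toList_append, show ("[" : String).toList = ['['] from rfl, List.append_assoc]
      exact takeWhile_bracket_append _ _ hb
  · rintro rfl
    have hsplit := List.takeWhile_append_dropWhile
      (p := fun x => x != '[') (l := k.toList)
    cases hdw : k.toList.dropWhile (fun x => x != '[') with
    | nil =>
      left
      rw [← String.toList_inj, toList_pyBase]
      rw [hdw, List.append_nil] at hsplit
      exact hsplit.symm
    | cons y r =>
      right
      have hy : y = '[' := by
        have := List.head?_dropWhile_not (p := fun x => x != '[') (l := k.toList)
        rw [hdw] at this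
        simpa using this
      refine ⟨r, ?_⟩
      rw [String.toList_append, toList_pyBase,
        show ("[" : String).toList = ['['] from rfl, List.append_assoc]
      rw [hdw, hy] at hsplit
      simpa using hsplit

-- B's result, characterised: buckets in sorted base order
theorem alt_eq_flatMap (params : List (String × String)) :
    sorted_params_alt params
      = (PySem.List.sorted (PySem.Set.ofList (params.map (fun kv => pyBase kv.1)))
          (fun x => x) false).flatMap
          (fun b => params.filter (fun kv => pyBase kv.1 == b)) := by
  rw [show sorted_params_alt params
      = (PySem.List.sorted
          (params.foldl (fun d kv => d.modify (pyBase kv.1) [] (fun l => l ++ [kv]))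
            (PySem.Dict.empty : PySem.Dict String (List (String × String)))).keys
          (fun x => x) false).foldl
          (fun out b => out ++
            (params.foldl (fun d kv => d.modify (pyBase kv.1) [] (fun l => l ++ [kv]))
              (PySem.Dict.empty : PySem.Dict String (List (String × String)))).getD b []) []
      from rfl]
  have hfold :
      params.foldl (fun d kv => d.modify (pyBase kv.1) [] (fun l => l ++ [kv]))
          (PySem.Dict.empty : PySem.Dict String (List (String × String)))
        = (params.map (fun kv => (pyBase kv.1, kv))).foldl
            (fun d p => d.modify p.1 [] (fun l => l ++ [p.2])) PySem.Dict.empty := by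
    rw [List.foldl_map]
  rw [hfold]
  have hkeys :
      ((params.map (fun kv => (pyBase kv.1, kv))).foldl
          (fun d p => d.modify p.1 [] (fun l => l ++ [p.2]))
          (PySem.Dict.empty : PySem.Dict String (List (String × String)))).keys
        = PySem.Set.ofList (params.map (fun kv => pyBase kv.1)) := by
    have h := PySem.Dict.keys_foldl_modify_key
      (l := params.map (fun kv => (pyBase kv.1, kv)))
      (key := fun p => p.1) (d0 := ([] : List (String × String)))
      (f := fun _ p => fun l => l ++ [p.2])
      (d := (PySem.Dict.empty : PySem.Dict String (List (String × String))))
    simp only [] at h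
    rw [h, show (PySem.Dict.empty : PySem.Dict String (List (String × String))).keys
        = PySem.Set.empty from rfl, PySem.Set.update_empty, List.map_map]
    rfl
  rw [hkeys]
  rw [PySem.List.foldl_append_eq_flatMap, List.nil_append]
  apply List.flatMap_congr
  intro b _
  rw [PySem.Dict.getD_foldl_modify_append]
  rw [PySem.Dict.getD_empty, List.nil_append, List.filter_map]
  rw [List.map_map]
  rw [show ((fun p : String × (String × String) => p.1 == b) ∘ fun kv : String × String => (pyBase kv.1, kv))
      = (fun kv : String × String => pyBase kv.1 == b) from rfl]
  rw [show ((fun x : String × (String × String) => x.2) ∘ fun kv : String × String => (pyBase kv.1, kv))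
      = id from rfl, List.map_id]

-- ===== VERDICT (by name: the statement is the Claim_ definition above) =====
theorem sorted_params_spec : Claim_equal_sorted_params := by
  intro params _ hpre
  have hpre' : (params.map (fun kv : String × String => kv.1)).Nodup := hpre
  unfold Spec_sorted_params
  rw [alt_eq_flatMap]
  rw [show sorted_params params
      = ((PySem.List.sorted (PySem.Set.ofList (params.map (fun kv => pyBase kv.1)))
            (fun x => x) false).foldl (fun od base =>
          params.foldl (fun od kv =>
            if kv.1 == base || PySem.Str.startswith kv.1 (base ++ "[") then
              od.insert kv.1 ((PySem.Dict.mk params).getD kv.1 "")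
            else od) od) (PySem.Dict.empty : PySem.Dict String String)).items
      from rfl]
  set bases := PySem.List.sorted (PySem.Set.ofList (params.map (fun kv => pyBase kv.1)))
    (fun x => x) false with hbases
  have hbases_nodup : bases.Nodup :=
    (PySem.List.sorted_perm
        (PySem.Set.ofList (params.map (fun kv : String × String => pyBase kv.1)))
        (fun x : String => x) false).symm.nodup
      (PySem.Set.nodup_ofList (params.map (fun kv : String × String => pyBase kv.1)))
  have hbase_nb : ∀ b ∈ bases, '[' ∉ b.toList := by
    intro b hb
    rw [hbases, PySem.List.mem_sorted, PySem.Set.mem_ofList, List.mem_map] at hb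
    obtain ⟨kv, _, rfl⟩ := hb
    exact pyBase_no_bracket kv.1
  -- rewrite A's nested loop: condition becomes pyBase-equality, lookup becomes kv.2
  have hstep :
      bases.foldl (fun od base =>
        params.foldl (fun od kv =>
          if kv.1 == base || PySem.Str.startswith kv.1 (base ++ "[") then
            od.insert kv.1 ((PySem.Dict.mk params).getD kv.1 "")
          else od) od) (PySem.Dict.empty : PySem.Dict String String)
      = bases.foldl (fun od base =>
          params.foldl (fun od kv =>
            if pyBase kv.1 == base then od.insert kv.1 kv.2 else od) od) PySem.Dict.empty := by
    apply PySem.List.foldl_congr_mem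
    intro od b hb
    apply PySem.List.foldl_congr_mem
    intro od' kv hkv
    rw [cond_eq kv.1 b (hbase_nb b hb)]
    by_cases hc : (pyBase kv.1 == b) = true
    · rw [if_pos hc, if_pos hc]
      congr 1
      exact PySem.Dict.getD_of_mem_items (PySem.Dict.mk params)
        (show (kv.1, kv.2) ∈ params from hkv)
        (by rw [PySem.Dict.keys_mk]; exact hpre') ""
    · rw [if_neg hc, if_neg hc]
  rw [hstep]
  -- the filtered nested insert-loop is one insert-loop over the concatenated buckets
  have hnest :
      bases.foldl (fun od base =>
        params.foldl (fun od kv =>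
          if pyBase kv.1 == base then od.insert kv.1 kv.2 else od) od)
        (PySem.Dict.empty : PySem.Dict String String)
      = (bases.flatMap (fun b => params.filter (fun kv => pyBase kv.1 == b))).foldl
          (fun od kv => od.insert kv.1 kv.2) PySem.Dict.empty := by
    rw [List.foldl_flatMap]
    apply PySem.List.foldl_congr_mem
    intro od b _
    rw [List.foldl_filter]
  rw [hnest]
  set L := bases.flatMap (fun b => params.filter (fun kv => pyBase kv.1 == b)) with hL
  -- keys of the concatenated buckets are pairwise distinct
  have hLnodup : (L.map (fun kv => kv.1)).Nodup := by
    rw [hL, List.map_flatMap, List.nodup_flatMap]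
    constructor
    · intro b _
      exact ((List.filter_sublist).map (fun kv : String × String => kv.1)).nodup hpre'
    · apply List.Pairwise.imp ?_ hbases_nodup
      intro b1 b2 hne x hx1 hx2
      simp only [List.mem_map, List.mem_filter] at hx1 hx2
      obtain ⟨kv1, ⟨_, h1⟩, rfl⟩ := hx1
      obtain ⟨kv2, ⟨_, h2⟩, hkk⟩ := hx2
      rw [beq_iff_eq] at h1 h2
      apply hne
      rw [← h1, ← h2, hkk]
  have hitems := PySem.Dict.items_foldl_insert_fresh L (fun kv => kv.1) (fun kv => kv.2)
    PySem.Dict.empty (fun a _ => PySem.Dict.contains_empty a.1) hLnodup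
  simp only [] at hitems
  rw [hitems]
  simp only [show (PySem.Dict.empty : PySem.Dict String String).items = [] from rfl,
    List.nil_append]
  simp
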